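-- pv_equiv track=rewrite | github.com/jasonzio/adventofcode2020 | 05/day05.py | bsp_to_int
-- ===== SOURCE A (Python) =====
-- def bsp_to_int(spec: str, notation: str) -> int:
--     """Convert binary space partition specification to the index within the space"""
--     minimum = 0
--     maximum = pow(2, len(spec))
--     for c in spec:
--         stride = int((maximum - minimum) / 2)
--         if c == notation[0]:    # lower half
--             maximum -= stride
--         else:
--             minimum += stride
--     return minimum
-- ===== SOURCE B (Python) =====
-- def bsp_to_int(spec: str, notation: str) -> int:
--     """Convert binary space partition specification to the index within the space"""
--     result = 0
--     for c in spec: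
--         result = result * 2 + (0 if c == notation[0] else 1)
--     return result
-- ===== Notes on version B (the rewrite author's own statement) =====
-- stated objective: simpler
-- what changed: Replaces interval bisection with min/max/stride state by a single accumulator result = result*2 + bit per character, which also avoids the intermediate float division.
import Mathlib
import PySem

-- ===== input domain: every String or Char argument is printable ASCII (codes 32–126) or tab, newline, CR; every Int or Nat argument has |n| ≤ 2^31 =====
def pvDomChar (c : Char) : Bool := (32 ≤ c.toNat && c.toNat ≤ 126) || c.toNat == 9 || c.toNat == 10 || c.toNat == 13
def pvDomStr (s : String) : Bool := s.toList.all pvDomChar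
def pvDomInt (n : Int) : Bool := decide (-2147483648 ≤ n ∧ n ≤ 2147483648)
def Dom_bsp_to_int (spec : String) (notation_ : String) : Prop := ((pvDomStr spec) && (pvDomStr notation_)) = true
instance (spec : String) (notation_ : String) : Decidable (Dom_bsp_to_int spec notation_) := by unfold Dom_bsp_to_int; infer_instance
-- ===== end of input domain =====

-- B replaces A's min/max interval bisection by a single result = result*2 + bit accumulator (simpler; same O(n) cost; return-value equivalence only).

-- ===== PORT A =====
-- A's loop over spec with state (minimum, maximum); notation[0] ported as head? of the char list
-- (inside Pre_ it is only consulted when spec is nonempty, where notation is nonempty).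
-- A's `int((maximum - minimum) / 2)` is float division; on every input admitted by Pre_
-- (len spec ≤ 1023) the difference maximum - minimum is a power of two below 2^1024, where
-- Python's float division is exact and nonnegative, so integer division `/ 2` is exact here.
def bspToIntLoopA : List Char → Option Char → Int → Int → Int
  | [], _, minimum, _ => minimum
  | c :: rest, n0, minimum, maximum =>
    let stride := (maximum - minimum) / 2
    if some c = n0 then bspToIntLoopA rest n0 minimum (maximum - stride)
    else bspToIntLoopA rest n0 (minimum + stride) maximum

def bsp_to_int (spec : String) (notation_ : String) : Int :=
  bspToIntLoopA spec.toList notation_.toList.head? 0 (2 ^ spec.toList.length)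

-- ===== PORT B =====
-- B's loop: result = result * 2 + (0 if c == notation[0] else 1)
def bsp_to_int_alt (spec : String) (notation_ : String) : Int :=
  spec.toList.foldl
    (fun result c => result * 2 + (if some c = notation_.toList.head? then 0 else 1)) 0

-- ===== PRECONDITION & SPEC =====
-- Pre_ excludes exactly the inputs where Python A raises: IndexError on notation[0] when
-- notation is empty and spec is not, and OverflowError from float-converting 2^len(spec)
-- in the stride division when len(spec) ≥ 1024.
def Pre_bsp_to_int (spec : String) (notation_ : String) : Prop :=
  (spec = "" ∨ notation_ ≠ "") ∧ spec.toList.length ≤ 1023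
instance (spec : String) (notation_ : String) : Decidable (Pre_bsp_to_int spec notation_) := by unfold Pre_bsp_to_int; infer_instance
def pvWitness_bsp_to_int : String × String := ("FBFBBFF", "FB")

def Spec_bsp_to_int (spec : String) (notation_ : String) (out : Int) : Prop := out = bsp_to_int_alt spec notation_
instance (spec : String) (notation_ : String) (out : Int) : Decidable (Spec_bsp_to_int spec notation_ out) := by unfold Spec_bsp_to_int; infer_instance

-- ===== CLAIM (what is proved, stated in full; the proofs are below) =====
def Claim_equal_bsp_to_int : Prop := ∀ (spec : String) (notation_ : String), Dom_bsp_to_int spec notation_ → Pre_bsp_to_int spec notation_ → Spec_bsp_to_int spec notation_ (bsp_to_int spec notation_)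

-- ===== LEMMAS AND PROOFS =====

-- B's fold shifts its accumulator by 2^(length of the remaining list).
theorem foldl_bits_shift (n0 : Option Char) (l : List Char) (a : Int) :
    l.foldl (fun result c => result * 2 + (if some c = n0 then 0 else 1)) a
      = a * 2 ^ l.length + l.foldl (fun result c => result * 2 + (if some c = n0 then 0 else 1)) 0 := by
  induction l generalizing a with
  | nil => simp
  | cons c rest ih =>
    simp only [List.foldl_cons, List.length_cons]
    rw [ih (a * 2 + _), ih (0 * 2 + _)]
    ring

-- A's bisection with maximum = minimum + 2^len computes minimum + B's bit value.
theorem loopA_eq (n0 : Option Char) (l : List Char) (m : Int) :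
    bspToIntLoopA l n0 m (m + 2 ^ l.length)
      = m + l.foldl (fun result c => result * 2 + (if some c = n0 then 0 else 1)) 0 := by
  induction l generalizing m with
  | nil => simp [bspToIntLoopA]
  | cons c rest ih =>
    have hstride : (m + 2 ^ (c :: rest).length - m) / 2 = (2 : Int) ^ rest.length := by
      have h : m + 2 ^ (c :: rest).length - m = 2 * 2 ^ rest.length := by
        simp [List.length_cons, pow_succ]; ring
      rw [h, Int.mul_ediv_cancel_left _ (by norm_num)]
    simp only [bspToIntLoopA, hstride, List.foldl_cons]
    by_cases h : some c = n0
    · have harg : m + 2 ^ (c :: rest).length - 2 ^ rest.length = m + 2 ^ rest.length := by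
        simp [List.length_cons, pow_succ]; ring
      simp only [h, if_true, harg, ih m]
      norm_num
    · have harg : m + 2 ^ (c :: rest).length = (m + 2 ^ rest.length) + 2 ^ rest.length := by
        simp [List.length_cons, pow_succ]; ring
      rw [if_neg h, if_neg h, harg, ih (m + 2 ^ rest.length)]
      have hacc : ((0 : Int) * 2 + 1) = 1 := by ring
      rw [hacc, foldl_bits_shift n0 rest 1]
      ring

-- ===== VERDICT (by name: the statement is the Claim_ definition above) =====
theorem bsp_to_int_spec : Claim_equal_bsp_to_int := by
  intro spec notation_ _ _
  unfold Spec_bsp_to_int bsp_to_int bsp_to_int_alt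
  have := loopA_eq notation_.toList.head? spec.toList 0
  simpa using this
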